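-- pv_equiv track=rewrite | github.com/ayseirmak/FuzzdFlags | fuzz_report.py | parse_clang_options_checker
-- ===== SOURCE A (Python) =====
-- def parse_clang_options_checker(checker_stdout):
--     """
--     Given the stdout from 'clang-options --checker', extract:
--       [Checker] Source File: ...
--       [Checker] Flags: ...
--     Return: (source_file, [flag1, flag2, ...])
--     If not found, returns (None, []).
--     """
--     source_file = None
--     flags_line = None
--
--     for line in checker_stdout.splitlines():
--         line = line.strip()
--         if line.startswith("[Checker] Source File:"):
--             source_file = line.split(":", 1)[1].strip()
--         elif line.startswith("[Checker] Flags:"):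
--             flags_line = line.split(":", 1)[1].strip()
--
--     if not source_file:
--         return (None, [])
--
--     if flags_line:
--         all_flags = flags_line.split()
--     else:
--         all_flags = []
--
--     return (source_file, all_flags)
-- ===== SOURCE B (Python) =====
-- # B: instead of one stateful overwrite loop, strip the lines once and take the
-- # LAST matching line for each prefix with a reversed early-exit search.
-- def _last_match(lines, prefix):
--     for l in reversed(lines):
--         if l.startswith(prefix):
--             return l.split(":", 1)[1].strip()
--     return None
--
-- def parse_clang_options_checker(checker_stdout):
--     lines = [l.strip() for l in checker_stdout.splitlines()]
--     source_file = _last_match(lines, "[Checker] Source File:")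
--     if not source_file:
--         return (None, [])
--     flags_line = _last_match(lines, "[Checker] Flags:")
--     return (source_file, flags_line.split() if flags_line else [])
-- ===== Notes on version B (the rewrite author's own statement) =====
-- stated objective: alternative
-- what changed: Replaces A's single stateful forward loop that overwrites two variables with a strip-once pass followed by two reversed early-exit searches for the last line matching each prefix.
import Mathlib
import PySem

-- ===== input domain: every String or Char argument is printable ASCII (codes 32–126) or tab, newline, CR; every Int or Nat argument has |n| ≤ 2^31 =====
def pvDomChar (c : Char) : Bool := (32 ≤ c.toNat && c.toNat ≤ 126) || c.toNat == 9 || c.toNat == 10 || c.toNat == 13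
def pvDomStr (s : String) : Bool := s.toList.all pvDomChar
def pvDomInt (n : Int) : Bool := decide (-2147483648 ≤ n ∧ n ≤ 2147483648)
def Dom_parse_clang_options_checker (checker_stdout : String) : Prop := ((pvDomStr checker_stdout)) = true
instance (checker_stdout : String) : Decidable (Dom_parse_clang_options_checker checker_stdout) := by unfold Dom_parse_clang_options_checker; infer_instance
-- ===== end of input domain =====

-- B replaces A's stateful overwrite loop with a strip-once pass plus two reversed
-- early-exit searches for the last matching line (alternative decomposition, same cost).


-- ===== PORT A =====
-- line.split(":", 1)[1].strip(); the [1] index is only reached on lines whose matched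
-- prefix contains ':', so the defaults never fire on executed paths
def pvAfterColonA (l : String) : String :=
  PySem.Str.strip (((PySem.Str.splitMax? l ":" 1).getD []).getD 1 "")

-- one iteration of A's for-loop: state = (source_file, flags_line)
def pvStepA (st : Option String × Option String) (line : String) :
    Option String × Option String :=
  if PySem.Str.startswith (PySem.Str.strip line) "[Checker] Source File:" then
    (some (pvAfterColonA (PySem.Str.strip line)), st.2)
  else if PySem.Str.startswith (PySem.Str.strip line) "[Checker] Flags:" then
    (st.1, some (pvAfterColonA (PySem.Str.strip line)))
  else st

def parse_clang_options_checker (checker_stdout : String) : Option String × List String :=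
  let st := (PySem.Str.splitlines checker_stdout).foldl pvStepA (none, none)
  match st.1 with
  | none => (none, [])
  | some s =>
    if s.toList.isEmpty then (none, [])        -- "if not source_file"
    else
      (some s,
       match st.2 with
       | some f => if f.toList.isEmpty then [] else PySem.Str.split₀ f
       | none => [])

-- ===== PORT B =====
-- Source B uses the same extraction expression l.split(":", 1)[1].strip(), so it shares pvAfterColonA
-- _last_match: scan the stripped lines in reverse, return the first hit, extracted
def pvLastMatch (lines : List String) (prefix_ : String) : Option String :=
  (lines.reverse.find? (fun l => PySem.Str.startswith l prefix_)).map pvAfterColonA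

def parse_clang_options_checker_alt (checker_stdout : String) : Option String × List String :=
  let lines := (PySem.Str.splitlines checker_stdout).map PySem.Str.strip
  match pvLastMatch lines "[Checker] Source File:" with
  | none => (none, [])
  | some s =>
    if s.toList.isEmpty then (none, [])        -- "if not source_file"
    else
      (some s,
       match pvLastMatch lines "[Checker] Flags:" with
       | some f => if f.toList.isEmpty then [] else PySem.Str.split₀ f
       | none => [])

-- ===== PRECONDITION & SPEC =====
def Spec_parse_clang_options_checker (checker_stdout : String) (out : Option String × List String) : Prop := out = parse_clang_options_checker_alt checker_stdout
instance (checker_stdout : String) (out : Option String × List String) : Decidable (Spec_parse_clang_options_checker checker_stdout out) := by unfold Spec_parse_clang_options_checker; infer_instance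

-- ===== CLAIM (what is proved, stated in full; the proofs are below) =====
def Claim_equal_parse_clang_options_checker : Prop := ∀ (checker_stdout : String), Dom_parse_clang_options_checker checker_stdout → Spec_parse_clang_options_checker checker_stdout (parse_clang_options_checker checker_stdout)

-- ===== LEMMAS AND PROOFS =====

-- a line cannot start with both prefixes (they disagree at position 10)
theorem pv_not_both (l : String)
    (h : PySem.Str.startswith l "[Checker] Source File:" = true) :
    PySem.Str.startswith l "[Checker] Flags:" = false := by
  by_contra hF
  simp only [Bool.not_eq_false] at hF
  rw [PySem.Str.startswith_eq, PySem.Chars.startswith_iff] at h hF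
  rcases List.prefix_or_prefix_of_prefix h hF with hp | hp
  · have := hp.length_le; simp at this
  · exact (by decide : ¬ ("[Checker] Flags:".toList <+: "[Checker] Source File:".toList)) hp

-- A's fold computes, in each component, the last matching stripped line (extracted),
-- falling back to the initial state.
theorem pv_fold_eq (xs : List String) (s0 f0 : Option String) :
    xs.foldl pvStepA (s0, f0) =
      ((pvLastMatch (xs.map PySem.Str.strip) "[Checker] Source File:").or s0,
       (pvLastMatch (xs.map PySem.Str.strip) "[Checker] Flags:").or f0) := by
  induction xs generalizing s0 f0 with
  | nil => simp [pvLastMatch]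
  | cons x xs ih =>
    have hrev : ∀ p : String,
        pvLastMatch (PySem.Str.strip x :: xs.map PySem.Str.strip) p =
          (pvLastMatch (xs.map PySem.Str.strip) p).or
            (if PySem.Str.startswith (PySem.Str.strip x) p then
               some (pvAfterColonA (PySem.Str.strip x)) else none) := by
      intro p
      simp only [pvLastMatch, List.reverse_cons, List.find?_append, List.find?_singleton]
      cases hfind : ((xs.map PySem.Str.strip).reverse.find?
          (fun l => PySem.Str.startswith l p)) <;>
        split_ifs with hp <;> simp [Option.or]
    by_cases hS : PySem.Str.startswith (PySem.Str.strip x) "[Checker] Source File:" = true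
    · have hF := pv_not_both _ hS
      simp only [List.foldl_cons, List.map_cons, hrev, pvStepA, hS, hF, if_true,
        Bool.false_eq_true, if_false]
      rw [ih]
      cases pvLastMatch (xs.map PySem.Str.strip) "[Checker] Source File:" <;>
      cases pvLastMatch (xs.map PySem.Str.strip) "[Checker] Flags:" <;>
        simp [Option.or, pvAfterColonA]
    · by_cases hF : PySem.Str.startswith (PySem.Str.strip x) "[Checker] Flags:" = true
      · simp only [List.foldl_cons, List.map_cons, hrev, pvStepA, hS, hF, if_true]
        rw [ih]
        cases pvLastMatch (xs.map PySem.Str.strip) "[Checker] Source File:" <;>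
        cases pvLastMatch (xs.map PySem.Str.strip) "[Checker] Flags:" <;>
          simp [Option.or, pvAfterColonA]
      · simp only [List.foldl_cons, List.map_cons, hrev, pvStepA, hS, hF]
        rw [ih]
        cases pvLastMatch (xs.map PySem.Str.strip) "[Checker] Source File:" <;>
        cases pvLastMatch (xs.map PySem.Str.strip) "[Checker] Flags:" <;>
          simp [Option.or]

-- ===== VERDICT (by name: the statement is the Claim_ definition above) =====
theorem parse_clang_options_checker_spec : Claim_equal_parse_clang_options_checker := by
  intro s _
  show _ = _
  unfold parse_clang_options_checker parse_clang_options_checker_alt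
  rw [pv_fold_eq]
  simp [Option.or_none]
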